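-- pv_equiv track=rewrite | github.com/MichaelMVS/password-analyzer | analyzer.py | _find_sequential
-- ===== SOURCE A (Python) =====
-- from typing import Dict, List
--
-- def _find_sequential(password: str) -> List[str]:
--     sequential = []
--     try:
--         for i in range(len(password) - 2):
--             if ord(password[i+1]) == ord(password[i]) + 1 and ord(password[i+2]) == ord(password[i+1]) + 1:
--                 sequential.append(password[i:i+3])
--     except:
--         pass
--     return sequential
-- ===== SOURCE B (Python) =====
-- def _find_sequential(password: str):
--     # Two-phase run-table algorithm: first split the string into maximal runs of
--     # consecutively-ascending characters, then each run of length L contributes its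
--     # L-2 length-3 windows, in left-to-right order (same order/overlaps as scanning).
--     runs = []
--     cur = []
--     for ch in password:
--         if cur and ord(ch) == ord(cur[-1]) + 1:
--             cur.append(ch)
--         else:
--             if cur:
--                 runs.append(cur)
--             cur = [ch]
--     if cur:
--         runs.append(cur)
--     return [''.join(run[k:k+3]) for run in runs for k in range(len(run) - 2)]
-- ===== Notes on version B (the rewrite author's own statement) =====
-- stated objective: alternative
-- what changed: Replaced the single triple-testing index loop by a two-phase algorithm: one pass builds a table of maximal ascending runs, a second pass emits the L-2 windows of each run of length L >= 3; the try/except is dropped since nothing can raise.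
import Mathlib
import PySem

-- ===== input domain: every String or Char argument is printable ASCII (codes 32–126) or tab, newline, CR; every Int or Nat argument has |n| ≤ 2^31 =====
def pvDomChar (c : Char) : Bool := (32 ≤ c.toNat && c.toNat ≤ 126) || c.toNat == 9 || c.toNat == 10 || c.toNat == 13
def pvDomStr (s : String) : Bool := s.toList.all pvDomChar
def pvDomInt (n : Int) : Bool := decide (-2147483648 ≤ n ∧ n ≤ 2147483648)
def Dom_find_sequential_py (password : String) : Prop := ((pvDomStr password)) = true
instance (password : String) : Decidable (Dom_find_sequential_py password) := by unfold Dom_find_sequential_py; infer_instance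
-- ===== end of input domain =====

-- B replaces A's triple-testing index loop by a two-phase algorithm: phase 1 builds a
-- table of maximal ascending runs, phase 2 emits each run's length-3 windows (alternative).

-- ===== PORT A =====
-- Index loop over range(len(password) - 2); every index i, i+1, i+2 is in range, so the
-- try/except never fires and pyGetD's default ' ' is never used (exact on all inputs).
def find_sequential_py (password : String) : List String :=
  let cs := password.toList
  (PySem.List.pyRange 0 ((cs.length : Int) - 2) 1).foldl
    (fun acc i =>
      if ((PySem.List.pyGetD cs (i + 1) ' ').toNat == (PySem.List.pyGetD cs i ' ').toNat + 1
          && (PySem.List.pyGetD cs (i + 2) ' ').toNat == (PySem.List.pyGetD cs (i + 1) ' ').toNat + 1)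
      then acc ++ [String.ofList (PySem.List.slice cs (some i) (some (i + 3)))]
      else acc) []

-- ===== PORT B =====
-- Phase 1 loop body: extend the open run `cur` if ch continues it, else flush it.
def pvSplitStep (st : List (List Char) × List Char) (ch : Char) : List (List Char) × List Char :=
  if !st.2.isEmpty && ch.toNat == (st.2.getLastD ' ').toNat + 1 then (st.1, st.2 ++ [ch])
  else if !st.2.isEmpty then (st.1 ++ [st.2], [ch]) else (st.1, [ch])

-- ''.join(run[k:k+3]) with 0 ≤ k < len(run)-2: ported as drop/take (exact for such slices).
def pvEmit (run : List Char) : List String :=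
  (List.range (run.length - 2)).map (fun k => String.ofList ((run.drop k).take 3))

def find_sequential_py_alt (password : String) : List String :=
  let st := password.toList.foldl pvSplitStep ([], [])
  let runs := if st.2.isEmpty then st.1 else st.1 ++ [st.2]
  runs.flatMap pvEmit

-- ===== PRECONDITION & SPEC =====
def Spec_find_sequential_py (password : String) (out : List String) : Prop := out = find_sequential_py_alt password
instance (password : String) (out : List String) : Decidable (Spec_find_sequential_py password out) := by unfold Spec_find_sequential_py; infer_instance

-- ===== CLAIM (what is proved, stated in full; the proofs are below) =====
def Claim_equal_find_sequential_py : Prop := ∀ (password : String), Dom_find_sequential_py password → Spec_find_sequential_py password (find_sequential_py password)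

-- ===== LEMMAS AND PROOFS =====

-- A's result in index/filter form
def pvAsc (cs : List Char) (i : Nat) : Bool :=
  (cs.getD (i+1) ' ').toNat == (cs.getD i ' ').toNat + 1
    && (cs.getD (i+2) ' ').toNat == (cs.getD (i+1) ' ').toNat + 1

def pvF (cs : List Char) : List String :=
  ((List.range (cs.length - 2)).filter (pvAsc cs)).map (fun i => String.ofList ((cs.drop i).take 3))

-- A's result in recursive-window form
def pvFr : List Char → List String
  | a :: b :: c :: t =>
      (if b.toNat == a.toNat + 1 && c.toNat == b.toNat + 1
       then [String.ofList [a, b, c]] else []) ++ pvFr (b :: c :: t)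
  | _ => []

-- reference form of phase 1: attach cs to the open run cur, then keep splitting
def pvConsRun : List Char → List Char → List (List Char)
  | cur, [] => [cur]
  | cur, c :: t =>
      if c.toNat == (cur.getLastD ' ').toNat + 1 then pvConsRun (cur ++ [c]) t
      else cur :: pvConsRun [c] t

def pvStepR (a b : Char) : Prop := b.toNat = a.toNat + 1

lemma A_eq_F (cs : List Char) :
    (PySem.List.pyRange 0 ((cs.length : Int) - 2) 1).foldl
      (fun acc i =>
        if ((PySem.List.pyGetD cs (i + 1) ' ').toNat == (PySem.List.pyGetD cs i ' ').toNat + 1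
            && (PySem.List.pyGetD cs (i + 2) ' ').toNat == (PySem.List.pyGetD cs (i + 1) ' ').toNat + 1)
        then acc ++ [String.ofList (PySem.List.slice cs (some i) (some (i + 3)))]
        else acc) [] = pvF cs := by
  match cs with
  | [] => rfl
  | [a] => rfl
  | a :: b :: t =>
    set cs := a :: b :: t with hcs
    have h2 : ((cs.length : Int) - 2) = ((cs.length - 2 : Nat) : Int) := by
      simp [hcs]; omega
    rw [h2, PySem.List.pyRange_zero_natCast, List.foldl_map, PySem.List.foldl_append_if,
      List.nil_append]
    unfold pvF
    have hfil : (List.range (cs.length - 2)).filter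
          (fun (i : Nat) =>
            ((PySem.List.pyGetD cs ((i:Int) + 1) ' ').toNat == (PySem.List.pyGetD cs (i:Int) ' ').toNat + 1
              && (PySem.List.pyGetD cs ((i:Int) + 2) ' ').toNat == (PySem.List.pyGetD cs ((i:Int) + 1) ' ').toNat + 1))
        = (List.range (cs.length - 2)).filter (pvAsc cs) := by
      refine List.filter_congr (fun i _ => ?_)
      simp only [pvAsc, (by push_cast; ring : ((i:Int) + 1) = (((i + 1 : Nat)) : Int)),
        (by push_cast; ring : ((i:Int) + 2) = (((i + 2 : Nat)) : Int)),
        PySem.List.pyGetD_natCast, List.getD]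
    refine Eq.trans (congrArg _ hfil) ?_
    refine List.map_congr_left (fun i _ => ?_)
    have e3 : ((i:Int) + 3) = ((i:Int) + ((3:Nat):Int)) := by norm_num
    rw [e3, PySem.List.slice_natCast_add]

lemma F_eq_Fr (cs : List Char) : pvF cs = pvFr cs := by
  induction cs with
  | nil => rfl
  | cons a cs ih =>
    match cs, ih with
    | [], _ => rfl
    | [b], _ => rfl
    | b :: c :: t, ih =>
      show pvF (a :: b :: c :: t) = _
      rw [pvFr, ← ih]
      unfold pvF
      have hlen : (a :: b :: c :: t).length - 2 = ((b :: c :: t).length - 2) + 1 := by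
        simp
      have h0 : pvAsc (a :: b :: c :: t) 0
          = (b.toNat == a.toNat + 1 && c.toNat == b.toNat + 1) := by
        simp [pvAsc, List.getD]
      have hsh : ∀ i : Nat, (pvAsc (a :: b :: c :: t) ∘ Nat.succ) i = pvAsc (b :: c :: t) i := by
        intro i; simp [pvAsc, List.getD]
      have hf : (List.range ((b :: c :: t).length - 2)).filter (pvAsc (a :: b :: c :: t) ∘ Nat.succ)
          = (List.range ((b :: c :: t).length - 2)).filter (pvAsc (b :: c :: t)) :=
        List.filter_congr fun i _ => hsh i
      rw [hlen, List.range_succ_eq_map, List.filter_cons, List.filter_map, hf, h0]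
      by_cases hb : (b.toNat == a.toNat + 1 && c.toNat == b.toNat + 1) = true
      · rw [if_pos hb, if_pos hb, List.map_cons, List.map_map]
        show _ :: _ = _ :: _
        refine congrArg₂ _ rfl ?_
        exact List.map_congr_left fun i _ => rfl
      · rw [if_neg hb, if_neg hb, List.nil_append, List.map_map]
        exact List.map_congr_left fun i _ => rfl

lemma emit_cons (a : Char) (run : List Char) :
    pvEmit (a :: run)
      = (if 2 ≤ run.length then [String.ofList (a :: run.take 2)] else []) ++ pvEmit run := by
  by_cases h : 2 ≤ run.length
  · have hlen : (a :: run).length - 2 = (run.length - 2) + 1 := by simp; omega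
    unfold pvEmit
    rw [hlen, List.range_succ_eq_map, List.map_cons, List.map_map, if_pos h]
    rfl
  · have h1 : run.length ≤ 1 := by omega
    unfold pvEmit
    rw [if_neg h]
    have e1 : (a :: run).length - 2 = 0 := by simp; omega
    have e2 : run.length - 2 = 0 := by omega
    rw [e1, e2]; rfl

lemma Fr_chain (cur : List Char) (h : List.IsChain pvStepR cur) : pvFr cur = pvEmit cur := by
  induction cur with
  | nil => rfl
  | cons a run ih =>
    match run, h, ih with
    | [], _, _ => rfl
    | [b], _, _ => rfl
    | b :: c :: t, h, ih =>
      rcases List.isChain_cons_cons.mp h with ⟨hab, h'⟩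
      rcases List.isChain_cons_cons.mp h' with ⟨hbc, _⟩
      have hcond : (b.toNat == a.toNat + 1 && c.toNat == b.toNat + 1) = true := by
        simp [pvStepR] at hab hbc; simp [hab, hbc]
      rw [pvFr, hcond, if_pos (rfl : (true : Bool) = true),
        emit_cons a (b :: c :: t), if_pos (by simp : 2 ≤ (b :: c :: t).length), ih h']
      rfl

lemma getLastD_cons_ne {α : Type} (a d : α) (l : List α) (h : l ≠ []) :
    (a :: l).getLastD d = l.getLastD d := by
  match l, h with
  | b :: t, _ => rfl

lemma Fr_boundary (c : Char) (t : List Char) :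
    ∀ (cur : List Char), cur ≠ [] → List.IsChain pvStepR cur →
      ¬ c.toNat = (cur.getLastD ' ').toNat + 1 →
      pvFr (cur ++ c :: t) = pvEmit cur ++ pvFr (c :: t) := by
  intro cur
  induction cur with
  | nil => intro h; exact absurd rfl h
  | cons a l ih =>
    intro _ hch hbr
    match l, hch, hbr, ih with
    | [], _, hbr, _ =>
      match t with
      | [] => rfl
      | d :: t' =>
        show pvFr (a :: c :: d :: t') = _
        rw [pvFr]
        have : (c.toNat == a.toNat + 1 && d.toNat == c.toNat + 1) = false := by
          simp [List.getLastD] at hbr; simp [hbr]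
        rw [this]
        simp only [Bool.false_eq_true, if_false, List.nil_append]
        rfl
    | b :: l', hch, hbr, ih =>
      rcases List.isChain_cons_cons.mp hch with ⟨hab, h'⟩
      have hbr' : ¬ c.toNat = ((b :: l').getLastD ' ').toNat + 1 := by
        rwa [getLastD_cons_ne a ' ' (b :: l') (by simp)] at hbr
      have ihv := ih (by simp) h' hbr'
      match l' with
      | [] =>
        show pvFr (a :: b :: c :: t) = _
        rw [pvFr]
        have : (b.toNat == a.toNat + 1 && c.toNat == b.toNat + 1) = false := by
          simp [List.getLastD] at hbr; simp [hbr]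
        rw [this]
        simp only [Bool.false_eq_true, if_false, List.nil_append]
        have he : pvEmit [a, b] = [] := rfl
        rw [he, List.nil_append]
        simpa using ihv
      | r :: l'' =>
        rcases List.isChain_cons_cons.mp h' with ⟨hbrr, _⟩
        show pvFr (a :: b :: r :: (l'' ++ c :: t)) = _
        rw [pvFr]
        have hcond : (b.toNat == a.toNat + 1 && r.toNat == b.toNat + 1) = true := by
          simp [pvStepR] at hab hbrr; simp [hab, hbrr]
        rw [hcond, if_pos (rfl : (true : Bool) = true)]
        have hre : pvFr (b :: r :: (l'' ++ c :: t)) = pvFr ((b :: r :: l'') ++ c :: t) := rfl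
        rw [hre, ihv, emit_cons a (b :: r :: l''), if_pos (by simp)]
        simp
lemma chain_snoc (cur : List Char) (c : Char) (h : List.IsChain pvStepR cur)
    (hc : c.toNat = (cur.getLastD ' ').toNat + 1) :
    List.IsChain pvStepR (cur ++ [c]) := by
  rw [List.isChain_append]
  refine ⟨h, List.isChain_singleton _, ?_⟩
  intro x hx y hy
  simp only [List.head?_cons, Option.mem_def, Option.some.injEq] at hy
  have hx' : x = cur.getLastD ' ' := by
    rw [List.getLastD_eq_getLast?]
    cases hcur : cur.getLast? with
    | none => rw [hcur] at hx; simp at hx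
    | some z => rw [hcur] at hx; simp at hx; simp [hx]
  subst hy; rw [hx']; exact hc

lemma main_L (cs : List Char) :
    ∀ (cur : List Char), cur ≠ [] → List.IsChain pvStepR cur →
      pvFr (cur ++ cs) = (pvConsRun cur cs).flatMap pvEmit := by
  induction cs with
  | nil =>
    intro cur _ hch
    rw [pvConsRun, List.append_nil]
    simp [List.flatMap]
    exact Fr_chain cur hch
  | cons c t ih =>
    intro cur hne hch
    rw [pvConsRun]
    by_cases hc : c.toNat = (cur.getLastD ' ').toNat + 1
    · rw [if_pos (by simpa using hc)]
      have : cur ++ c :: t = (cur ++ [c]) ++ t := by simp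
      rw [this, ih (cur ++ [c]) (by simp) (chain_snoc cur c hch hc)]
    · rw [if_neg (by simpa using hc), List.flatMap_cons,
        Fr_boundary c t cur hne hch hc]
      congr 1
      exact ih [c] (by simp) (List.isChain_singleton c)

lemma foldl_split (cs : List Char) :
    ∀ (runs : List (List Char)) (cur : List Char), cur ≠ [] →
      (cs.foldl pvSplitStep (runs, cur)).2 ≠ [] ∧
      (cs.foldl pvSplitStep (runs, cur)).1 ++ [(cs.foldl pvSplitStep (runs, cur)).2]
        = runs ++ pvConsRun cur cs := by
  induction cs with
  | nil => intro runs cur h; exact ⟨h, rfl⟩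
  | cons c t ih =>
    intro runs cur h
    rw [List.foldl_cons, pvConsRun]
    by_cases hc : c.toNat = (cur.getLastD ' ').toNat + 1
    · have hs : pvSplitStep (runs, cur) c = (runs, cur ++ [c]) := by
        unfold pvSplitStep
        rw [if_pos (by simp [h]; rwa [← List.getLastD_eq_getLast?])]
      rw [hs, if_pos (by simpa using hc)]
      exact ih runs (cur ++ [c]) (by simp)
    · have hs : pvSplitStep (runs, cur) c = (runs ++ [cur], [c]) := by
        unfold pvSplitStep
        rw [if_neg (by simp [h]; rwa [← List.getLastD_eq_getLast?]), if_pos (by simp [h])]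
      rw [hs, if_neg (by simpa using hc)]
      rcases ih (runs ++ [cur]) [c] (by simp) with ⟨h1, h2⟩
      exact ⟨h1, by rw [h2]; simp⟩

-- ===== VERDICT (by name: the statement is the Claim_ definition above) =====
theorem find_sequential_py_spec : Claim_equal_find_sequential_py := by
  intro password _
  unfold Spec_find_sequential_py find_sequential_py find_sequential_py_alt
  rw [A_eq_F, F_eq_Fr]
  match hcs : password.toList with
  | [] => rfl
  | c :: t =>
    have h0 : pvSplitStep ([], []) c = ([], [c]) := rfl
    rw [List.foldl_cons, h0]
    rcases foldl_split t [] [c] (by simp) with ⟨h1, h2⟩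
    simp only [List.isEmpty_iff, h1, if_false]
    rw [h2, List.nil_append, ← main_L t [c] (by simp) (List.isChain_singleton c)]
    rfl
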